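-- pv_equiv track=rewrite | github.com/Jared-Caraan/Thinking-Chair | Hackerrank/Algorithms/Greedy/Problem Solving - Basic/Easy/luckBalance.py | luckBalance
-- ===== SOURCE A (Python) =====
-- def luckBalance(k, contests):
--
--     counter = 0
--     max_luck = 0
--
--     non_important = [i[0] for i in contests if i[1] == 0]
--     important = [i[0] for i in contests if i[1] == 1]
--     important.sort(reverse=True)
--
--     for i in important:
--         if counter != k:
--             max_luck += i
--             counter += 1
--         else:
--             max_luck -= i
--
--     return max_luck + sum(non_important)
-- ===== SOURCE B (Python) =====
-- def _sum_smallest(xs, m):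
--     # sum of the m smallest values of xs (with multiplicity), iterative quickselect
--     acc = 0
--     while True:
--         if m <= 0:
--             return acc
--         if m >= len(xs):
--             return acc + sum(xs)
--         p = xs[len(xs) // 2]
--         lows = [x for x in xs if x < p]
--         highs = [x for x in xs if x > p]
--         ne = len(xs) - len(lows) - len(highs)
--         if m <= len(lows):
--             xs = lows
--         elif m <= len(lows) + ne:
--             return acc + sum(lows) + p * (m - len(lows))
--         else:
--             acc += sum(lows) + ne * p
--             m -= len(lows) + ne
--             xs = highs
--
--
-- def luckBalance(k, contests):
--     total = 0
--     important = []
--     for c in contests: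
--         if c[1] == 0:
--             total += c[0]
--         elif c[1] == 1:
--             important.append(c[0])
--     total += sum(important)
--     if 0 <= k < len(important):
--         total -= 2 * _sum_smallest(important, len(important) - k)
--     return total
-- ===== Notes on version B (the rewrite author's own statement) =====
-- stated objective: alternative
-- what changed: Replaces A's descending sort plus counting loop by a single accumulating pass over the contests and an iterative quickselect that sums the smallest (len-k) important values directly, with no sort.
import Mathlib
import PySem

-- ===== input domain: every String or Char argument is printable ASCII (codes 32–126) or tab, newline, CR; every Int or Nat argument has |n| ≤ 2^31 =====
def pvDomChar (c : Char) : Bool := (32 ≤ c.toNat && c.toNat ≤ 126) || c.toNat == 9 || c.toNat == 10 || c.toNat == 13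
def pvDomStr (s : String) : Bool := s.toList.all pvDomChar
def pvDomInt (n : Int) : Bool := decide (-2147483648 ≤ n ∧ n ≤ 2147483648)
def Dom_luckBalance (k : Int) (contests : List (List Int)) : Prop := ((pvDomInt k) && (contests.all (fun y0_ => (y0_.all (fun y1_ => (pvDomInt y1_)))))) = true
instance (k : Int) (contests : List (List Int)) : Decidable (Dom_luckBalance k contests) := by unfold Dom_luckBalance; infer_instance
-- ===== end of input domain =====

-- B replaces A's descending sort + counting loop by a single accumulating pass plus an
-- iterative quickselect for the sum of the smallest (len-k) important values (objective:
-- alternative algorithm; not claimed faster).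

-- ===== PORT A =====
-- Under Pre_ every inner list has length ≥ 2, so Python's i[0] / i[1] is exactly List.getD.
def luckBalance (k : Int) (contests : List (List Int)) : Int :=
  let non_important := (contests.filter (fun i => i.getD 1 0 == 0)).map (fun i => i.getD 0 0)
  let important := (contests.filter (fun i => i.getD 1 0 == 1)).map (fun i => i.getD 0 0)
  let importantS := PySem.List.sorted important (fun x => x) true
  let s := importantS.foldl
    (fun (s : Int × Int) i => if s.1 ≠ k then (s.1 + 1, s.2 + i) else (s.1, s.2 - i)) (0, 0)
  s.2 + non_important.sum

-- ===== PORT B =====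
-- termination helper for the quickselect recursion (the pivot is removed from both sides)
theorem pvPivot_mem {xs : List Int} (h : xs ≠ []) : xs.getD (xs.length / 2) 0 ∈ xs := by
  have hlt : xs.length / 2 < xs.length := by
    have : 0 < xs.length := List.length_pos_iff.mpr h
    omega
  rw [List.getD_eq_getElem _ _ hlt]
  exact List.getElem_mem hlt

-- iterative quickselect loop of Source B (the index len//2 is provably in range in the branch used)
def sumSmallestB (xs : List Int) (m : Int) (acc : Int) : Int :=
  if _hm : m ≤ 0 then acc
  else if _hl : (xs.length : Int) ≤ m then acc + xs.sum
  else
    let p := xs.getD (xs.length / 2) 0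
    let lows := xs.filter (fun x => x < p)
    let highs := xs.filter (fun x => p < x)
    let ne : Int := (xs.length : Int) - lows.length - highs.length
    if m ≤ (lows.length : Int) then sumSmallestB lows m acc
    else if m ≤ (lows.length : Int) + ne then acc + lows.sum + p * (m - lows.length)
    else sumSmallestB highs (m - lows.length - ne) (acc + lows.sum + ne * p)
termination_by xs.length
decreasing_by
  all_goals
    simp
    have hne : xs ≠ [] := by rintro rfl; simp at _hl; omega
    rw [show xs.length = xs.attach.length from (List.length_attach).symm,
       List.length_filter_lt_length_iff_exists]
    exact ⟨⟨_, pvPivot_mem hne⟩, List.mem_attach _ _, by simp [List.getD]⟩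

def luckBalance_alt (k : Int) (contests : List (List Int)) : Int :=
  let s := contests.foldl
    (fun (s : Int × List Int) c =>
      if c.getD 1 0 == 0 then (s.1 + c.getD 0 0, s.2)
      else if c.getD 1 0 == 1 then (s.1, s.2 ++ [c.getD 0 0])
      else s) ((0 : Int), ([] : List Int))
  let total := s.1 + s.2.sum
  if 0 ≤ k ∧ k < (s.2.length : Int) then
    total - 2 * sumSmallestB s.2 ((s.2.length : Int) - k) 0
  else total

-- ===== PRECONDITION & SPEC =====
-- Pre_ excludes exactly the inputs where Python raises IndexError: an inner list with
-- fewer than 2 elements (both A and B index c[0] and c[1]).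
def Pre_luckBalance (k : Int) (contests : List (List Int)) : Prop :=
  ∀ c ∈ contests, 2 ≤ c.length
instance (k : Int) (contests : List (List Int)) : Decidable (Pre_luckBalance k contests) := by
  unfold Pre_luckBalance; infer_instance

def pvWitness_luckBalance : Int × List (List Int) := (2, [[5, 1], [3, 1], [4, 0], [2, 1]])

def Spec_luckBalance (k : Int) (contests : List (List Int)) (out : Int) : Prop := out = luckBalance_alt k contests
instance (k : Int) (contests : List (List Int)) (out : Int) : Decidable (Spec_luckBalance k contests out) := by unfold Spec_luckBalance; infer_instance

-- ===== CLAIM (what is proved, stated in full; the proofs are below) =====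
def Claim_equal_luckBalance : Prop := ∀ (k : Int) (contests : List (List Int)), Dom_luckBalance k contests → Pre_luckBalance k contests → Spec_luckBalance k contests (luckBalance k contests)

-- ===== LEMMAS AND PROOFS =====


-- B's single pass over the contests computes (sum of non-important luck, list of important luck)
theorem pvFoldB (cs : List (List Int)) (t : Int) (acc : List Int) :
    cs.foldl (fun (s : Int × List Int) c =>
        if c.getD 1 0 == 0 then (s.1 + c.getD 0 0, s.2)
        else if c.getD 1 0 == 1 then (s.1, s.2 ++ [c.getD 0 0])
        else s) (t, acc)
    = (t + ((cs.filter (fun i => i.getD 1 0 == 0)).map (fun i => i.getD 0 0)).sum,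
       acc ++ (cs.filter (fun i => i.getD 1 0 == 1)).map (fun i => i.getD 0 0)) := by
  induction cs generalizing t acc with
  | nil => simp
  | cons c cs ih =>
    simp only [List.foldl_cons]
    by_cases h0 : c.getD 1 0 = 0
    all_goals simp only [List.getD_eq_getElem?_getD] at h0
    · rw [if_pos (by simp [h0]), ih]
      simp [h0, add_assoc]
    · by_cases h1 : c.getD 1 0 = 1
      all_goals simp only [List.getD_eq_getElem?_getD] at h1
      · rw [if_neg (by simp [h0]), if_pos (by simp [h1]), ih]
        simp [h1]
      · rw [if_neg (by simp [h0]), if_neg (by simp [h1]), ih]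
        simp [h0, h1]

-- A's counting loop: adds the first (k - c) elements, subtracts the rest
theorem pvFoldA (k : Int) (L : List Int) (c a : Int) :
    (L.foldl (fun (s : Int × Int) i =>
        if s.1 ≠ k then (s.1 + 1, s.2 + i) else (s.1, s.2 - i)) (c, a)).2
    = if 0 ≤ k - c ∧ k - c ≤ (L.length : Int) then
        a + (L.take (k - c).toNat).sum - (L.drop (k - c).toNat).sum
      else a + L.sum := by
  induction L generalizing c a with
  | nil => simp
  | cons x L ih =>
    by_cases hc : c = k
    · subst hc
      simp only [List.foldl_cons]
      rw [show (if c ≠ c then (c + 1, a + x) else (c, a - x)) = (c, a - x) by simp, ih]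
      have h0 : (0:Int) ≤ c - c ∧ c - c ≤ (L.length : Int) := by constructor <;> omega
      have h1 : (0:Int) ≤ c - c ∧ c - c ≤ (((x :: L).length : Nat) : Int) := by
        simp; omega
      rw [if_pos h0, if_pos h1]
      simp
      omega
    · simp only [List.foldl_cons]
      rw [show (if c ≠ k then (c + 1, a + x) else (c, a - x)) = (c + 1, a + x) by simp [hc], ih]
      by_cases hk : 0 ≤ k - c ∧ k - c ≤ (((x :: L).length : Nat) : Int)
      · rw [if_pos hk]
        have h2 : 0 ≤ k - (c + 1) ∧ k - (c + 1) ≤ (L.length : Int) := by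
          simp at hk; constructor <;> omega
        rw [if_pos h2]
        have ht : (k - c).toNat = (k - (c + 1)).toNat + 1 := by omega
        rw [ht]
        simp [List.take_succ_cons, List.drop_succ_cons]
        ring
      · rw [if_neg hk]
        have h2 : ¬(0 ≤ k - (c + 1) ∧ k - (c + 1) ≤ (L.length : Int)) := by
          simp at hk ⊢
          omega
        rw [if_neg h2]
        simp
        ring

-- Python's sort with reverse=True on ints is the reverse of the ascending sort
theorem pvSortedDesc (xs : List Int) :
    PySem.List.sorted xs (fun x => x) true = (PySem.List.sorted xs (fun x => x) false).reverse := by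
  have h := PySem.List.eq_of_perm_of_pairwise_le_of_injective (fun x : Int => x)
    (fun a b h => h)
    (l₁ := (PySem.List.sorted xs (fun x => x) true).reverse)
    (l₂ := PySem.List.sorted xs (fun x => x) false)
    (((PySem.List.sorted xs (fun x => x) true).reverse_perm.trans
        (PySem.List.sorted_perm ..)).trans (PySem.List.sorted_perm ..).symm)
    (List.pairwise_reverse.mpr (PySem.List.sorted_pairwise_rev ..))
    (PySem.List.sorted_pairwise ..)
  rw [← h, List.reverse_reverse]

-- trichotomy partition of a list by a pivot
theorem pvPerm3 (xs : List Int) (p : Int) :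
    ((xs.filter (fun x => x < p)) ++ ((xs.filter (fun x => x == p)) ++ (xs.filter (fun x => p < x)))).Perm xs := by
  have h1 := List.filter_append_perm (fun x : Int => decide (x < p)) xs
  have h2 := List.filter_append_perm (fun x : Int => x == p) (xs.filter (fun x => !decide (x < p)))
  have e1 : (xs.filter (fun x => !decide (x < p))).filter (fun x => x == p)
      = xs.filter (fun x => x == p) := by
    rw [List.filter_filter]
    apply List.filter_congr
    intro x _
    by_cases hx : x = p <;> simp [hx]
  have e2 : (xs.filter (fun x => !decide (x < p))).filter (fun x => !(x == p))
      = xs.filter (fun x => p < x) := by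
    rw [List.filter_filter]
    apply List.filter_congr
    intro x _
    by_cases hx : p < x <;> simp [hx] <;> omega
  rw [e1, e2] at h2
  exact (List.Perm.append_left _ h2).trans h1

-- the ascending sort splits at a pivot into sorted lows, the pivot block, sorted highs
theorem pvSortedSplit (xs : List Int) (p : Int) :
    PySem.List.sorted xs (fun x => x) false
    = PySem.List.sorted (xs.filter (fun x => x < p)) (fun x => x) false
      ++ List.replicate (xs.filter (fun x => x == p)).length p
      ++ PySem.List.sorted (xs.filter (fun x => p < x)) (fun x => x) false := by
  have heq : xs.filter (fun x => x == p) = List.replicate (xs.filter (fun x => x == p)).length p := by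
    rw [List.eq_replicate_iff]
    exact ⟨rfl, fun b hb => by simpa using (List.mem_filter.mp hb).2⟩
  apply PySem.List.sorted_id_eq_of_perm_of_pairwise
  · -- permutation
    have hp3 := pvPerm3 xs p
    rw [heq] at hp3
    refine List.Perm.trans ?_ hp3
    rw [List.append_assoc]
    exact (PySem.List.sorted_perm ..).append
      ((List.Perm.refl _).append (PySem.List.sorted_perm ..))
  · -- pairwise ≤
    rw [List.append_assoc]
    rw [List.pairwise_append]
    refine ⟨by simpa using PySem.List.sorted_pairwise (xs.filter (fun x => x < p)) (fun x => x), ?_, ?_⟩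
    · rw [List.pairwise_append]
      refine ⟨List.pairwise_replicate.2 (Or.inr le_rfl), by simpa using PySem.List.sorted_pairwise (xs.filter (fun x => p < x)) (fun x => x), ?_⟩
      intro a ha b hb
      have ha' : a = p := List.eq_of_mem_replicate ha
      have hb' : p < b := by
        have := (List.mem_filter.mp ((PySem.List.mem_sorted ..).mp hb)).2
        simpa using this
      omega
    · intro a ha b hb
      have ha' : a < p := by
        have := (List.mem_filter.mp ((PySem.List.mem_sorted ..).mp ha)).2
        simpa using this
      rcases List.mem_append.mp hb with hb | hb
      · have : b = p := List.eq_of_mem_replicate hb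
        omega
      · have : p < b := by
          have := (List.mem_filter.mp ((PySem.List.mem_sorted ..).mp hb)).2
          simpa using this
        omega

-- the quickselect loop computes acc + (sum of the m smallest values)
theorem pvSumSmallestAux (n : Nat) (xs : List Int) (hn : xs.length ≤ n) (m acc : Int) :
    sumSmallestB xs m acc
    = acc + ((PySem.List.sorted xs (fun x => x) false).take m.toNat).sum := by
  induction n generalizing xs m acc with
  | zero =>
    have hx : xs = [] := List.length_eq_zero_iff.mp (by omega)
    subst hx
    rw [sumSmallestB]
    by_cases hm : m ≤ 0
    · simp [hm, show m.toNat = 0 by omega]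
    · simp [hm]
      rw [if_pos (show (0:Int) ≤ m by omega)]
      rw [(PySem.List.sorted_eq_nil_iff _ _ _).mpr rfl]
      simp
  | succ n ih =>
    rw [sumSmallestB]
    by_cases hm : m ≤ 0
    · simp [hm, show m.toNat = 0 by omega]
    · by_cases hl : (xs.length : Int) ≤ m
      · rw [dif_neg hm, dif_pos hl]
        rw [List.take_of_length_le (by rw [PySem.List.length_sorted]; omega),
          (PySem.List.sorted_perm xs (fun x => x) false).sum_eq]
      · rw [dif_neg hm, dif_neg hl]
        set p := xs.getD (xs.length / 2) 0 with hp
        have hxne : xs ≠ [] := by rintro rfl; simp at hl; omega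
        have hpm : p ∈ xs := pvPivot_mem hxne
        set lo := xs.filter (fun x => x < p) with hlo
        set eqs := xs.filter (fun x => x == p) with heqs
        set hi := xs.filter (fun x => p < x) with hhi
        have hlen : lo.length + (eqs.length + hi.length) = xs.length := by
          have := (pvPerm3 xs p).length_eq
          simpa using this
        have hlolt : lo.length < xs.length ∧ hi.length < xs.length := by
          constructor <;>
            · rw [List.length_filter_lt_length_iff_exists]
              exact ⟨p, hpm, by simp⟩
        have hsplit := pvSortedSplit xs p
        rw [← hlo, ← heqs, ← hhi] at hsplit
        set SL := PySem.List.sorted lo (fun x => x) false with hSL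
        set SH := PySem.List.sorted hi (fun x => x) false with hSH
        have hSLlen : SL.length = lo.length := PySem.List.length_sorted ..
        have hSHlen : SH.length = hi.length := PySem.List.length_sorted ..
        have hSLsum : SL.sum = lo.sum := (PySem.List.sorted_perm ..).sum_eq
        by_cases h1 : m ≤ (lo.length : Int)
        · rw [if_pos h1, ih lo (by omega) m acc, hsplit]
          rw [List.take_append_of_le_length
            (by rw [List.length_append, hSLlen, List.length_replicate]; omega)]
          rw [List.take_append_of_le_length (by rw [hSLlen]; omega)]
        · rw [if_neg h1]
          by_cases h2 : m ≤ (lo.length : Int) + ((xs.length : Int) - lo.length - hi.length)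
          · rw [if_pos h2, hsplit]
            have ht1 : List.take m.toNat (SL ++ List.replicate eqs.length p ++ SH)
                = SL ++ List.replicate (m.toNat - lo.length) p := by
              rw [List.take_append_of_le_length
                (by rw [List.length_append, hSLlen, List.length_replicate]; omega)]
              rw [List.take_append,
                List.take_of_length_le (by rw [hSLlen]; omega),
                List.take_replicate]
              congr 1
              congr 1
              rw [hSLlen]
              omega
            rw [ht1]
            rw [List.sum_append, hSLsum, List.sum_replicate]
            have hc : ((m.toNat - lo.length : Nat) : Int) = m - lo.length := by omega
            rw [nsmul_eq_mul]
            push_cast [hc]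
            rw [← hlo]
            ring
          · rw [if_neg h2, ih hi (by omega) _ _, hsplit]
            have ht1 : List.take m.toNat (SL ++ List.replicate eqs.length p ++ SH)
                = (SL ++ List.replicate eqs.length p)
                  ++ List.take ((m - lo.length - ((xs.length : Int) - lo.length - hi.length)).toNat) SH := by
              rw [List.take_append, List.take_of_length_le
                (by rw [List.length_append, hSLlen, List.length_replicate]; omega)]
              congr 2
              rw [List.length_append, hSLlen, List.length_replicate]
              omega
            rw [ht1]
            rw [List.sum_append, List.sum_append, hSLsum, List.sum_replicate]
            have hc2 : ((eqs.length : Nat) : Int) = (xs.length : Int) - lo.length - hi.length := by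
              omega
            rw [nsmul_eq_mul]
            push_cast [hc2]
            rw [← hlo, ← hhi, ← hSH]
            ring

theorem pvSumSmallest (xs : List Int) (m acc : Int) :
    sumSmallestB xs m acc
    = acc + ((PySem.List.sorted xs (fun x => x) false).take m.toNat).sum :=
  pvSumSmallestAux xs.length xs le_rfl m acc

-- ===== VERDICT (by name: the statement is the Claim_ definition above) =====
theorem luckBalance_spec : Claim_equal_luckBalance := by
  intro k contests _ _
  show luckBalance k contests = luckBalance_alt k contests
  simp only [luckBalance, luckBalance_alt]
  rw [pvFoldA k, pvFoldB, pvSumSmallest, pvSortedDesc]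
  simp only [List.nil_append, zero_add, sub_zero]
  set NI := (contests.filter (fun i => i.getD 1 0 == 0)).map (fun i => i.getD 0 0) with hNI
  set IMP := (contests.filter (fun i => i.getD 1 0 == 1)).map (fun i => i.getD 0 0) with hIMP
  set S := PySem.List.sorted IMP (fun x => x) false with hS
  have hlen : S.length = IMP.length := PySem.List.length_sorted ..
  have hsum : S.sum = IMP.sum := (PySem.List.sorted_perm ..).sum_eq
  have hrsum : S.reverse.sum = IMP.sum := by rw [List.sum_reverse, hsum]
  by_cases hk : 0 ≤ k ∧ k < (IMP.length : Int)
  · rw [if_pos hk, if_pos (by simp [hlen]; omega)]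
    have hdrop : S.reverse.drop k.toNat = (S.take (S.length - k.toNat)).reverse :=
      List.drop_reverse ..
    have hidx : S.length - k.toNat = ((IMP.length : Int) - k).toNat := by
      rw [hlen]; omega
    have hsplitsum : (S.reverse.take k.toNat).sum + (S.reverse.drop k.toNat).sum = IMP.sum := by
      rw [← List.sum_append, List.take_append_drop, hrsum]
    have hdsum : (S.reverse.drop k.toNat).sum = (S.take ((IMP.length : Int) - k).toNat).sum := by
      rw [hdrop, List.sum_reverse, hidx]
    omega
  · rw [if_neg hk]
    by_cases hk2 : 0 ≤ k ∧ k ≤ ((S.reverse.length : Nat) : Int)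
    · rw [if_pos hk2]
      have hkn : k.toNat = S.reverse.length := by
        simp only [List.length_reverse, hlen] at hk2 ⊢
        omega
      rw [List.take_of_length_le (by omega), List.drop_eq_nil_of_le (by omega)]
      simp [hrsum]
      omega
    · rw [if_neg hk2]
      omega
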